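-- pv_equiv track=rewrite | github.com/inteligencia-artificial-e-afins/python-refresh-JoaoBortolotti | 01/exercises.py | count_increasing_subsets
-- ===== SOURCE A (Python) =====
-- def count_increasing_subsets(nums):
--     count = 0
--     n = len(nums)
--
--     # Percorre todos os elementos da lista
--     for i in range(n):
--         # Inicializa o tamanho do subconjunto atual como 1
--         subset_size = 1
--         # Verifica quantos elementos à direita podem ser incluídos no subconjunto crescente
--         for j in range(i + 1, n):
--             if nums[j] > nums[j - 1]:
--                 subset_size += 1
--             else:
--                 break
--         # Adiciona ao contador o número de subconjuntos crescentes que podem ser formados a partir deste elemento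
--         count += (subset_size * (subset_size + 1)) // 2
--
--     return count
-- ===== SOURCE B (Python) =====
-- def count_increasing_subsets(nums):
--     # Backward DP: run = length of the strictly increasing run starting at i,
--     # computed in O(1) from the run starting at i+1; one pass, O(n).
--     total = 0
--     run = 0
--     for i in range(len(nums) - 1, -1, -1):
--         run = run + 1 if i + 1 < len(nums) and nums[i + 1] > nums[i] else 1
--         total += run * (run + 1) // 2
--     return total
-- ===== Notes on version B (the rewrite author's own statement) =====
-- stated objective: faster
-- what changed: Replaces the per-index rightward rescan with a single backward pass that derives each run length from the one after it in O(1).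
import Mathlib
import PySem

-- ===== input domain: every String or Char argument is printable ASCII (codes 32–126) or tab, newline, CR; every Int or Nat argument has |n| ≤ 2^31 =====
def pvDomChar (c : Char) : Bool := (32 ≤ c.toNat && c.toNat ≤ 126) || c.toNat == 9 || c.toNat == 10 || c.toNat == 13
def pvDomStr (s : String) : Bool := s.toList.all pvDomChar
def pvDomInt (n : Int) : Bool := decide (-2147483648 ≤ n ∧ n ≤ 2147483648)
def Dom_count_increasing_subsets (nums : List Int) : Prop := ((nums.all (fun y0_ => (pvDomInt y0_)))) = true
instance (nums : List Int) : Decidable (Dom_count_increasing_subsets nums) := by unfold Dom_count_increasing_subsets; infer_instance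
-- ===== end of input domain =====

-- B replaces A's per-index rightward rescan (O(n^2)) by one backward pass that derives each
-- run length from the one after it (O(n)); equal return value on every input.

-- ===== PORT A =====
-- inner 'for j in range(i+1, n): if nums[j] > nums[j-1]: subset_size += 1 else: break',
-- folded into a recursion on j (the range bound j < n is the first conjunct of the guard).
def aInner (nums : List Int) (j : Nat) (size : Int) : Int :=
  if h : j < nums.length ∧ nums.getD j 0 > nums.getD (j - 1) 0 then
    aInner nums (j + 1) (size + 1)
  else size
termination_by nums.length - j
decreasing_by omega

def count_increasing_subsets (nums : List Int) : Int :=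
  (List.range nums.length).foldl
    (fun count i =>
      let s := aInner nums (i + 1) 1
      count + PySem.Int.floordiv (s * (s + 1)) 2)
    0

-- ===== PORT B =====
-- Source B's backward index loop is realised as structural recursion from the tail: bGo returns
-- (run, total) for the suffix, exactly the two state variables of the Python loop, updated in
-- the same (back-to-front) order.
def bGo : List Int → Int × Int
  | [] => (0, 0)
  | a :: rest =>
    let rt := bGo rest
    let run : Int :=
      match rest with
      | b :: _ => if b > a then rt.1 + 1 else 1
      | [] => 1
    (run, rt.2 + PySem.Int.floordiv (run * (run + 1)) 2)

def count_increasing_subsets_alt (nums : List Int) : Int := (bGo nums).2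

-- ===== PRECONDITION & SPEC =====
def Spec_count_increasing_subsets (nums : List Int) (out : Int) : Prop := out = count_increasing_subsets_alt nums
instance (nums : List Int) (out : Int) : Decidable (Spec_count_increasing_subsets nums out) := by unfold Spec_count_increasing_subsets; infer_instance

-- ===== CLAIM (what is proved, stated in full; the proofs are below) =====
def Claim_equal_count_increasing_subsets : Prop := ∀ (nums : List Int), Dom_count_increasing_subsets nums → Spec_count_increasing_subsets nums (count_increasing_subsets nums)

-- ===== LEMMAS AND PROOFS =====

-- linearity of the inner loop in its accumulator
theorem aInner_add (nums : List Int) (j : Nat) (s t : Int) :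
    aInner nums j (s + t) = aInner nums j s + t := by
  conv_lhs => rw [aInner]
  conv_rhs => rw [aInner]
  split_ifs with h
  · have he : s + t + 1 = s + 1 + t := by ring
    rw [he]
    exact aInner_add nums (j + 1) (s + 1) t
  · rfl
termination_by nums.length - j
decreasing_by omega

-- the inner scan only looks at positions ≥ j - 1, so it shifts under cons
theorem aInner_shift (a : Int) (rest : List Int) (j : Nat) (s : Int) (hj : 1 ≤ j) :
    aInner (a :: rest) (j + 1) s = aInner rest j s := by
  have hget : ∀ k : Nat, (a :: rest).getD (k + 1) 0 = rest.getD k 0 := by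
    intro k; simp [List.getD]
  have hiff : (j + 1 < (a :: rest).length ∧
      (a :: rest).getD (j + 1) 0 > (a :: rest).getD (j + 1 - 1) 0) ↔
      (j < rest.length ∧ rest.getD j 0 > rest.getD (j - 1) 0) := by
    have he : j + 1 - 1 = (j - 1) + 1 := by omega
    rw [he, hget, hget]
    constructor
    · rintro ⟨h1, h2⟩; exact ⟨by simpa using h1, h2⟩
    · rintro ⟨h1, h2⟩; exact ⟨by simpa using h1, h2⟩
  by_cases h : j < rest.length ∧ rest.getD j 0 > rest.getD (j - 1) 0
  · conv_lhs => rw [aInner]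
    conv_rhs => rw [aInner]
    rw [dif_pos (hiff.mpr h), dif_pos h]
    exact aInner_shift a rest (j + 1) (s + 1) (by omega)
  · conv_lhs => rw [aInner]
    conv_rhs => rw [aInner]
    rw [dif_neg (fun hc => h (hiff.mp hc)), dif_neg h]
termination_by rest.length - j
decreasing_by omega

-- a foldl that only adds per-element contributions is the sum of those contributions
theorem foldl_add_sum (f : Nat → Int) (l : List Nat) (init : Int) :
    l.foldl (fun c i => c + f i) init = init + (l.map f).sum := by
  induction l generalizing init with
  | nil => simp
  | cons x xs ih => simp [List.foldl_cons, ih]; ring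

-- A's outer foldl is the sum of the per-index triangular contributions
theorem countA_sum (nums : List Int) :
    count_increasing_subsets nums =
      ((List.range nums.length).map
        (fun i =>
          PySem.Int.floordiv (aInner nums (i + 1) 1 * (aInner nums (i + 1) 1 + 1)) 2)).sum := by
  have h := foldl_add_sum
    (fun i => PySem.Int.floordiv (aInner nums (i + 1) 1 * (aInner nums (i + 1) 1 + 1)) 2)
    (List.range nums.length) 0
  simpa [count_increasing_subsets] using h

-- the backward DP computes (head run length, A's total) on every suffix
theorem bGo_spec (l : List Int) :
    (bGo l).1 = (if l.isEmpty then 0 else aInner l 1 1) ∧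
    (bGo l).2 = count_increasing_subsets l := by
  induction l with
  | nil => simp [bGo, count_increasing_subsets]
  | cons a rest ih =>
    obtain ⟨ih1, ih2⟩ := ih
    have hhead : (bGo (a :: rest)).1 = aInner (a :: rest) 1 1 := by
      cases rest with
      | nil =>
        have e1 : aInner [a] 1 1 = 1 := by
          rw [aInner, dif_neg (by simp)]
        simp [bGo, e1]
      | cons b t =>
        by_cases hba : b > a
        · have hcond : 1 < (a :: b :: t).length ∧
              (a :: b :: t).getD 1 0 > (a :: b :: t).getD (1 - 1) 0 := by
            refine ⟨by simp, ?_⟩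
            simpa [List.getD] using hba
          have e1 : aInner (a :: b :: t) 1 1 = aInner (a :: b :: t) 2 2 := by
            conv_lhs => rw [aInner]
            rw [dif_pos hcond]
            norm_num
          have e2 : aInner (a :: b :: t) 2 2 = aInner (b :: t) 1 1 + 1 := by
            have ha := aInner_add (a :: b :: t) 2 1 1
            have hs := aInner_shift a (b :: t) 1 1 le_rfl
            norm_num at ha hs
            rw [ha, hs]
          have hb1 : (bGo (a :: b :: t)).1 = (bGo (b :: t)).1 + 1 := by
            rw [bGo]; simp [hba]
          rw [hb1, ih1, e1, e2]
          simp
        · have hcond : ¬ (1 < (a :: b :: t).length ∧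
              (a :: b :: t).getD 1 0 > (a :: b :: t).getD (1 - 1) 0) := by
            intro hc
            exact hba (by simpa [List.getD] using hc.2)
          have e1 : aInner (a :: b :: t) 1 1 = 1 := by
            rw [aInner, dif_neg hcond]
          simp [bGo, hba, e1]
    refine ⟨hhead, ?_⟩
    have hrange : List.range (a :: rest).length =
        0 :: (List.range rest.length).map Nat.succ := by
      simp [List.length_cons, List.range_succ_eq_map]
    have hsum : count_increasing_subsets (a :: rest) =
        PySem.Int.floordiv (aInner (a :: rest) 1 1 * (aInner (a :: rest) 1 1 + 1)) 2 +
          count_increasing_subsets rest := by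
      rw [countA_sum (a :: rest), countA_sum rest, hrange, List.map_cons,
        List.sum_cons, List.map_map]
      have hmap : List.map
          ((fun i => PySem.Int.floordiv
            (aInner (a :: rest) (i + 1) 1 * (aInner (a :: rest) (i + 1) 1 + 1)) 2) ∘ Nat.succ)
          (List.range rest.length) =
          List.map (fun i => PySem.Int.floordiv
            (aInner rest (i + 1) 1 * (aInner rest (i + 1) 1 + 1)) 2)
          (List.range rest.length) := by
        apply List.map_congr_left
        intro i _
        simp only [Function.comp_apply]
        rw [show i.succ = i + 1 from rfl,
          aInner_shift a rest (i + 1) 1 (by omega)]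
      rw [hmap]
    have hbgo2 : (bGo (a :: rest)).2 =
        (bGo rest).2 +
          PySem.Int.floordiv ((bGo (a :: rest)).1 * ((bGo (a :: rest)).1 + 1)) 2 := by
      cases rest <;> simp [bGo]
    rw [hbgo2, hhead, ih2, hsum]
    ring

-- ===== VERDICT (by name: the statement is the Claim_ definition above) =====
theorem count_increasing_subsets_spec : Claim_equal_count_increasing_subsets := by
  intro nums _
  unfold Spec_count_increasing_subsets count_increasing_subsets_alt
  exact ((bGo_spec nums).2).symm
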